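-- pv_equiv track=rewrite | github.com/shengjie98/codeitsuisse2020 | codeitsuisse/routes/inventory.py | next_common
-- ===== SOURCE A (Python) =====
-- def next_common(word1, word2):
--     dict1 = {}
--     dict2 = {}
--     nearest_common = -1
--
--     for i in range(len(word1)):
--         if dict1.get(word1[i]) is None:
--             dict1[word1[i]] = i
--     for i in range(len(word2)):
--         if dict2.get(word2[i]) is None:
--             dict2[word2[i]] = i
--
--     for i in word1:
--         dist = dict2.get(i)
--         if (dist != None):
--             if (nearest_common == -1) or (dist<nearest_common):
--                 nearest_common = dist
--     return nearest_common
-- ===== SOURCE B (Python) =====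
-- def next_common(word1, word2):
--     present = set(word1)
--     for i, c in enumerate(word2):
--         if c in present:
--             return i
--     return -1
-- ===== Notes on version B (the rewrite author's own statement) =====
-- stated objective: faster
-- what changed: Instead of building two first-occurrence index dicts and taking a min over all of word1's shared chars, B builds one membership set of word1 and scans word2 left-to-right, returning at the first shared index (early exit), -1 otherwise.
import Mathlib
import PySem

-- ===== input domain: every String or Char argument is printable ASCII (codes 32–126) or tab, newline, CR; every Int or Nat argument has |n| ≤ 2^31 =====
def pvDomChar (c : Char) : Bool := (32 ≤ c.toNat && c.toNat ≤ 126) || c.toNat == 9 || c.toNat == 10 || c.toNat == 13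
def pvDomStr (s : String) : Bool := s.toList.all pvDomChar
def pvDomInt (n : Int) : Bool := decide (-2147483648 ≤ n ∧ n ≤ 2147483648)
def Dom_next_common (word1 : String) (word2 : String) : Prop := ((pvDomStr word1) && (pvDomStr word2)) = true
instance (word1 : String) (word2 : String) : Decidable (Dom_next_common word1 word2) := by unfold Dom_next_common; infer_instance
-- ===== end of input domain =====

-- B replaces A's two first-occurrence index dicts + min over word1's shared chars
-- by a single membership set of word1 and a left-to-right early-exit scan of word2 (simpler).

-- ===== PORT A =====
-- for i in range(len(word)): if dict.get(word[i]) is None: dict[word[i]] = i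
-- (ported as a fold over enumerate(word); word[i] with i in range(len(word)) is always in range)
def pvBuildFirst (l : List Char) : PySem.Dict Char Int :=
  (PySem.List.enumerate l 0).foldl
    (fun d p =>
      match d.get? p.2 with
      | none => d.insert p.2 p.1
      | some _ => d)
    PySem.Dict.empty

def next_common (word1 : String) (word2 : String) : Int :=
  let _dict1 := pvBuildFirst word1.toList
  let dict2 := pvBuildFirst word2.toList
  word1.toList.foldl
    (fun nearest_common c =>
      match dict2.get? c with
      | none => nearest_common
      | some dist =>
          if nearest_common = -1 ∨ dist < nearest_common then dist else nearest_common)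
    (-1)

-- ===== PORT B =====
-- for i, c in enumerate(word2): if c in present: return i
def pvScan (present : PySem.Set Char) : List Char → Nat → Int
  | [], _ => -1
  | c :: rest, i => if PySem.Set.contains present c then (i : Int) else pvScan present rest (i + 1)

def next_common_alt (word1 : String) (word2 : String) : Int :=
  pvScan (PySem.Set.ofList word1.toList) word2.toList 0

-- ===== PRECONDITION & SPEC =====
def Spec_next_common (word1 : String) (word2 : String) (out : Int) : Prop := out = next_common_alt word1 word2
instance (word1 : String) (word2 : String) (out : Int) : Decidable (Spec_next_common word1 word2 out) := by unfold Spec_next_common; infer_instance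

-- ===== CLAIM (what is proved, stated in full; the proofs are below) =====
def Claim_equal_next_common : Prop := ∀ (word1 : String) (word2 : String), Dom_next_common word1 word2 → Spec_next_common word1 word2 (next_common word1 word2)

-- ===== LEMMAS AND PROOFS =====

def pvToInt : Option Nat → Int
  | none => -1
  | some k => (k : Int)

-- dict characterization: the built dict maps each char to its first index
theorem pvBuild_get_gen (l : List Char) :
    ∀ (n : Int) (d : PySem.Dict Char Int) (c : Char),
      ((PySem.List.enumerate l n).foldl
        (fun d p =>
          match d.get? p.2 with
          | none => d.insert p.2 p.1
          | some _ => d) d).get? c =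
      (match d.get? c with
       | some v => some v
       | none => (List.idxOf? c l).map (fun j => n + (j : Int))) := by
  induction l with
  | nil => intro n d c; simp [PySem.List.enumerate]; cases d.get? c <;> simp
  | cons h t ih =>
    intro n d c
    rw [PySem.List.enumerate_cons, List.foldl_cons]
    cases hd : d.get? h with
    | some w =>
      simp only [hd]
      rw [ih]
      by_cases hc : c = h
      · subst hc; simp [hd]
      · have : (h == c) = false := by simp [beq_iff_eq]; exact fun e => hc e.symm
        rw [List.idxOf?_cons, this]
        cases d.get? c with
        | some v => simp
        | none =>
          simp only [if_neg (by simp_all : ¬ (h == c) = true)]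
          cases List.idxOf? c t <;> simp <;> omega
    | none =>
      simp only [hd]
      rw [ih]
      by_cases hc : c = h
      · subst hc
        rw [PySem.Dict.get?_insert]
        simp [hd, List.idxOf?_cons]
      · rw [PySem.Dict.get?_insert, if_neg hc]
        have hbeq : (h == c) = false := by simp [beq_iff_eq]; exact fun e => hc e.symm
        rw [List.idxOf?_cons, hbeq]
        cases d.get? c with
        | some v => simp
        | none =>
          simp only [if_neg (by simp [hbeq] : ¬ (h == c) = true)]
          cases List.idxOf? c t <;> simp <;> omega

theorem pvBuild_get (l : List Char) (c : Char) :
    (pvBuildFirst l).get? c = (List.idxOf? c l).map (fun j => (j : Int)) := by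
  unfold pvBuildFirst
  rw [pvBuild_get_gen]
  simp [PySem.Dict.get?_empty]

-- Nat-level min fold
def pvMinFold (g : Char → Option Nat) (l : List Char) (m : Option Nat) : Option Nat :=
  l.foldl
    (fun m c =>
      match g c, m with
      | none, m => m
      | some d, none => some d
      | some d, some k => some (min d k)) m

-- A's Int fold equals the Nat min fold through pvToInt
theorem pvFoldA_eq (g : Char → Option Nat) (l : List Char) :
    ∀ (m : Option Nat),
      l.foldl
        (fun a c =>
          match g c with
          | none => a
          | some d => if a = -1 ∨ (d : Int) < a then (d : Int) else a)
        (pvToInt m)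
      = pvToInt (pvMinFold g l m) := by
  induction l with
  | nil => intro m; simp [pvMinFold]
  | cons h t ih =>
    intro m
    simp only [List.foldl_cons, pvMinFold] at *
    cases hg : g h with
    | none => simpa [hg] using ih m
    | some d =>
      cases m with
      | none =>
        simp only [hg, pvToInt]
        rw [if_pos (Or.inl trivial)]
        exact ih (some d)
      | some k =>
        simp only [hg, pvToInt]
        by_cases hlt : (d : Int) < (k : Int)
        · rw [if_pos (Or.inr hlt)]
          have hmin : min d k = d := by omega
          rw [hmin]
          exact ih (some d)
        · have hne : ¬ ((k : Int) = -1 ∨ (d : Int) < (k : Int)) := by omega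
          rw [if_neg hne]
          have hmin : min d k = k := by omega
          rw [hmin]
          exact ih (some k)

theorem pvMinFold_all_none (g : Char → Option Nat) (l : List Char)
    (hg : ∀ c ∈ l, g c = none) : ∀ m, pvMinFold g l m = m := by
  induction l with
  | nil => intro m; rfl
  | cons h t ih =>
    intro m
    simp only [pvMinFold, List.foldl_cons, hg h (by simp)]
    exact ih (fun c hc => hg c (by simp [hc])) m

theorem pvMinFold_zero_acc (g : Char → Option Nat) (l : List Char) :
    pvMinFold g l (some 0) = some 0 := by
  induction l with
  | nil => rfl
  | cons h t ih =>
    simp only [pvMinFold, List.foldl_cons] at *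
    cases g h with
    | none => exact ih
    | some d => simpa [Nat.min_zero] using ih

theorem pvMinFold_has_zero (g : Char → Option Nat) (l : List Char) (c : Char)
    (hc : c ∈ l) (hg : g c = some 0) : ∀ m, pvMinFold g l m = some 0 := by
  induction l with
  | nil => cases hc
  | cons h t ih =>
    intro m
    by_cases hh : g h = some 0
    · have : pvMinFold g (h :: t) m = pvMinFold g t
        (match g h, m with
          | none, m => m
          | some d, none => some d
          | some d, some k => some (min d k)) := rfl
      rw [this, hh]
      cases m with
      | none => exact pvMinFold_zero_acc g t
      | some k => simpa [Nat.zero_min] using pvMinFold_zero_acc g t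
    · have hct : c ∈ t := by
        rcases List.mem_cons.mp hc with rfl | h2
        · exact absurd hg hh
        · exact h2
      exact ih hct _

-- shifting every value by +1 shifts the min fold by +1
theorem pvMinFold_shift (g : Char → Option Nat) (l : List Char) :
    ∀ m, pvMinFold (fun c => (g c).map (· + 1)) l (m.map (· + 1))
      = (pvMinFold g l m).map (· + 1) := by
  induction l with
  | nil => intro m; rfl
  | cons h t ih =>
    intro m
    simp only [pvMinFold, List.foldl_cons] at *
    cases hg : g h with
    | none => simp only [hg, Option.map_none]; exact ih m
    | some d =>
      cases m with
      | none => simpa [hg] using ih (some d)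
      | some k =>
        have : min (d + 1) (k + 1) = min d k + 1 := by omega
        simpa [hg, this] using ih (some (min d k))

-- the crux: the min of first-occurrence indices of shared chars is the
-- first index of word2 whose char lies in word1
theorem pvMinFold_eq_findIdx? (l1 : List Char) : ∀ (l2 : List Char),
    pvMinFold (fun c => List.idxOf? c l2) l1 none
      = l2.findIdx? (fun c => decide (c ∈ l1)) := by
  intro l2
  induction l2 with
  | nil =>
    rw [pvMinFold_all_none _ _ (fun c _ => by simp)]
    simp
  | cons b t ih =>
    by_cases hb : b ∈ l1
    · rw [pvMinFold_has_zero _ l1 b hb (by simp [List.idxOf?_cons])]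
      rw [List.findIdx?_cons, if_pos (by simpa using hb)]
    · have hcong : pvMinFold (fun c => List.idxOf? c (b :: t)) l1 none
          = pvMinFold (fun c => (List.idxOf? c t).map (· + 1)) l1 none := by
        unfold pvMinFold
        apply PySem.List.foldl_congr_mem
        intro acc c hc
        have hcb : (b == c) = false := by
          simp only [beq_eq_false_iff_ne, ne_eq]; rintro rfl; exact hb hc
        simp [List.idxOf?_cons, hcb]
      rw [hcong]
      have := pvMinFold_shift (fun c => List.idxOf? c t) l1 none
      simp only [Option.map_none] at this
      rw [this, ih]
      rw [List.findIdx?_cons, if_neg (by simpa using hb)]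

-- B's scan equals findIdx? shifted by the running index
theorem pvScan_eq (present : PySem.Set Char) (l : List Char) :
    ∀ (i : Nat),
      pvScan present l i
        = (match l.findIdx? (fun c => PySem.Set.contains present c) with
           | none => -1
           | some j => ((i + j : Nat) : Int)) := by
  induction l with
  | nil => intro i; simp [pvScan]
  | cons h t ih =>
    intro i
    rw [pvScan, List.findIdx?_cons]
    by_cases hp : h ∈ present
    · have hc : PySem.Set.contains present h = true := by
        simp [PySem.Set.contains, hp]
      simp [hc, hp]
    · have hc : PySem.Set.contains present h = false := by
        simp [PySem.Set.contains, hp]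
      rw [hc, if_neg (by simp), if_neg (by simp), ih (i + 1)]
      cases t.findIdx? (fun c => PySem.Set.contains present c) with
      | none => simp
      | some j =>
        simp only [Option.map_some]
        push_cast
        ring

theorem pvContains_ofList (l : List Char) (c : Char) :
    PySem.Set.contains (PySem.Set.ofList l) c = decide (c ∈ l) := by
  simp [PySem.Set.contains, PySem.Set.mem_ofList]

-- ===== VERDICT (by name: the statement is the Claim_ definition above) =====
theorem next_common_spec : Claim_equal_next_common := by
  intro word1 word2 _
  unfold Spec_next_common next_common next_common_alt
  have hget : ∀ c, (pvBuildFirst word2.toList).get? c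
      = (List.idxOf? c word2.toList).map (fun j => (j : Int)) :=
    fun c => pvBuild_get word2.toList c
  have hA : word1.toList.foldl
      (fun nearest_common c =>
        match (pvBuildFirst word2.toList).get? c with
        | none => nearest_common
        | some dist =>
            if nearest_common = -1 ∨ dist < nearest_common then dist else nearest_common)
      (-1)
      = pvToInt (pvMinFold (fun c => List.idxOf? c word2.toList) word1.toList none) := by
    have hcong := PySem.List.foldl_congr_mem word1.toList
      (fun nearest_common c =>
        match (pvBuildFirst word2.toList).get? c with
        | none => nearest_common
        | some dist =>
            if nearest_common = -1 ∨ dist < nearest_common then dist else nearest_common)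
      (fun a c =>
        match List.idxOf? c word2.toList with
        | none => a
        | some d => if a = -1 ∨ (d : Int) < a then (d : Int) else a)
      (-1)
      (fun acc x _ => by
        simp only [hget x]
        cases List.idxOf? x word2.toList <;> simp)
    rw [hcong]
    exact pvFoldA_eq (fun c => List.idxOf? c word2.toList) word1.toList none
  rw [hA, pvMinFold_eq_findIdx?]
  have hscan := pvScan_eq (PySem.Set.ofList word1.toList) word2.toList 0
  rw [hscan]
  have hpred : (fun c => PySem.Set.contains (PySem.Set.ofList word1.toList) c)
      = (fun c => decide (c ∈ word1.toList)) := by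
    funext c; exact pvContains_ofList word1.toList c
  rw [hpred]
  cases word2.toList.findIdx? (fun c => decide (c ∈ word1.toList)) with
  | none => rfl
  | some j => simp [pvToInt]
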